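-- pv_equiv track=rewrite | github.com/jbirby/Flex-Codec | scripts/flex_common.py | encode_alpha
-- ===== SOURCE A (Python) =====
-- def encode_alpha(text):
--     bits = []
--     for ch in text:
--         v = ord(ch) & 0x7F
--         for i in range(7):
--             bits.append((v >> i) & 1)
--     while len(bits) % 21 != 0:
--         bits.append(0)
--     chunks = []
--     for i in range(0, len(bits), 21):
--         v = 0
--         for b in bits[i:i + 21]:
--             v = (v << 1) | b
--         chunks.append(v & 0x1FFFFF)
--     return chunks
-- ===== SOURCE B (Python) =====
-- def encode_alpha(text):
--     # Group characters in threes and pack arithmetically; no bit list, no padding pass.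
--     def rev7(v):
--         r = 0
--         for i in range(7):
--             r = 2 * r + ((v >> i) & 1)
--         return r
--     rs = [rev7(ord(ch) & 0x7F) for ch in text]
--     chunks = []
--     for j in range(0, len(rs), 3):
--         r0 = rs[j]
--         r1 = rs[j + 1] if j + 1 < len(rs) else 0
--         r2 = rs[j + 2] if j + 2 < len(rs) else 0
--         chunks.append((r0 * 128 + r1) * 128 + r2)
--     return chunks
-- ===== Notes on version B (the rewrite author's own statement) =====
-- stated objective: faster
-- what changed: Instead of building a per-bit list, zero-padding it to a multiple of 21 and re-folding 21-bit slices, B maps each character to its reversed 7-bit value and packs the characters arithmetically three at a time (missing trailing characters count as 0), eliminating the intermediate bit list and the padding phase (7x fewer loop iterations and list appends).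
import Mathlib
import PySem

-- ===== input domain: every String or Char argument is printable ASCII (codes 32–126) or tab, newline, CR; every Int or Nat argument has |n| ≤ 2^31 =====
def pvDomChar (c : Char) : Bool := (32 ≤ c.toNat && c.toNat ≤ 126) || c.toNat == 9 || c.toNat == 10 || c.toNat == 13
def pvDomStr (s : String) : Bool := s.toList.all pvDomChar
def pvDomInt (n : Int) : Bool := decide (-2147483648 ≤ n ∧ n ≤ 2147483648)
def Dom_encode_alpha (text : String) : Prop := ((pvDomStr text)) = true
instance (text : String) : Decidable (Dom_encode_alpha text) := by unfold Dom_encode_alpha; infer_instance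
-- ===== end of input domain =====

-- B packs characters three at a time into 21-bit chunks arithmetically, instead of
-- building a bit list, zero-padding it to a multiple of 21 and re-folding 21-bit slices.


-- ===== PORT A =====
-- 'for i in range(7): bits.append((v >> i) & 1)' for one character
def pvBits7 (v : Int) : List Int := (List.range 7).map (fun (i : Nat) => PySem.Int.band (v >>> i) 1)

-- 'while len(bits) % 21 != 0: bits.append(0)'
def pvPad21 (bits : List Int) : List Int :=
  if bits.length % 21 ≠ 0 then pvPad21 (bits ++ [(0 : Int)]) else bits
termination_by (21 - bits.length % 21) % 21
decreasing_by simp [List.length_append]; omega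

-- inner fold 'v = (v << 1) | b' over one slice, then 'v & 0x1FFFFF'
def pvChunkVal (l : List Int) : Int :=
  PySem.Int.band (l.foldl (fun v b => PySem.Int.bor (v <<< (1 : Nat)) b) 0) 0x1FFFFF

-- 'for i in range(0, len(bits), 21): … bits[i:i + 21] …'
def pvChunkLoop (bits : List Int) (i : Nat) : List Int :=
  if i < bits.length then
    pvChunkVal (PySem.List.slice bits (some (i : Int)) (some ((i : Int) + 21))) ::
      pvChunkLoop bits (i + 21)
  else []
termination_by bits.length - i

def encode_alpha (text : String) : List Int :=
  let bits := text.toList.foldl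
    (fun bits ch => bits ++ pvBits7 (PySem.Int.band ((ch.toNat : Int)) 0x7F)) []
  pvChunkLoop (pvPad21 bits) 0

-- ===== PORT B =====
-- 'r = 2 * r + ((v >> i) & 1)' over i in range(7)
def pvRev7 (v : Int) : Int :=
  (List.range 7).foldl (fun r (i : Nat) => 2 * r + PySem.Int.band (v >>> i) 1) 0

-- the loop over j in range(0, len(rs), 3), missing r's read as 0
def pvGroup3 : List Int → List Int
  | [] => []
  | [a] => [(a * 128 + 0) * 128 + 0]
  | [a, b] => [(a * 128 + b) * 128 + 0]
  | a :: b :: c :: rest => ((a * 128 + b) * 128 + c) :: pvGroup3 rest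

def encode_alpha_alt (text : String) : List Int :=
  pvGroup3 (text.toList.map (fun ch => pvRev7 (PySem.Int.band ((ch.toNat : Int)) 0x7F)))

-- ===== PRECONDITION & SPEC =====
def Spec_encode_alpha (text : String) (out : List Int) : Prop := out = encode_alpha_alt text
instance (text : String) (out : List Int) : Decidable (Spec_encode_alpha text out) := by unfold Spec_encode_alpha; infer_instance

-- ===== CLAIM (what is proved, stated in full; the proofs are below) =====
def Claim_equal_encode_alpha : Prop := ∀ (text : String), Dom_encode_alpha text → Spec_encode_alpha text (encode_alpha text)

-- ===== LEMMAS AND PROOFS =====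

-- proof-only helpers
def pvNval (l : List Int) : Int := l.foldl (fun a b => 2 * a + b) 0

def pvChunks21 (l : List Int) : List Int :=
  if l = [] then [] else pvChunkVal (l.take 21) :: pvChunks21 (l.drop 21)
termination_by l.length
decreasing_by
  have : 0 < l.length := List.length_pos_iff.mpr (by assumption)
  simp [List.length_drop]; omega

-- every entry of pvBits7 of a natural code is 0 or 1
theorem pvBits7_01 (m : Nat) : ∀ b ∈ pvBits7 (m : Int), b = 0 ∨ b = 1 := by
  intro b hb
  simp only [pvBits7, List.mem_map, List.mem_range] at hb
  obtain ⟨i, -, rfl⟩ := hb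
  rw [show ((m : Int) >>> i) = ((m >>> i : Nat) : Int) from (Int.natCast_shiftRight ..).symm,
    show (1 : Int) = ((1 : Nat) : Int) by norm_num, PySem.Int.band_natCast, Nat.and_one_is_mod]
  rcases Nat.mod_two_eq_zero_or_one (m >>> i) with h | h <;> simp [h]

theorem pvBits7_length (v : Int) : (pvBits7 v).length = 7 := by
  simp [pvBits7]

-- Nat fact: 2n ||| 1 = 2n + 1
theorem pv_two_mul_or_one (n : Nat) : 2 * n ||| 1 = 2 * n + 1 := by
  have h1 : (2 * n ||| 1) / 2 = n := by rw [Nat.or_div_two]; simp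
  have h2 : (2 * n ||| 1) % 2 = 1 := by rw [Nat.or_mod_two_eq_one]; simp
  omega

-- one step of A's inner fold is arithmetic
theorem pv_step_eq (v b : Int) (hv : 0 ≤ v) (hb : b = 0 ∨ b = 1) :
    PySem.Int.bor (v <<< (1 : Nat)) b = 2 * v + b := by
  obtain ⟨n, rfl⟩ := Int.eq_ofNat_of_zero_le hv
  rw [Int.shiftLeft_eq]
  rcases hb with rfl | rfl
  · rw [PySem.Int.bor_zero]; ring
  · rw [show ((n : Int) * 2 ^ 1) = ((2 * n : Nat) : Int) by push_cast; ring,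
      show (1 : Int) = ((1 : Nat) : Int) by norm_num, PySem.Int.bor_natCast,
      pv_two_mul_or_one]
    push_cast; ring

-- A's inner fold equals the arithmetic fold on 0/1 bit lists
theorem pv_foldl_step_eq (l : List Int) (h01 : ∀ b ∈ l, b = 0 ∨ b = 1) :
    ∀ v : Int, 0 ≤ v →
      l.foldl (fun a b => PySem.Int.bor (a <<< (1 : Nat)) b) v = l.foldl (fun a b => 2 * a + b) v := by
  induction l with
  | nil => intro v _; rfl
  | cons b t ih =>
    intro v hv
    have hb := h01 b List.mem_cons_self
    have hb0 : (0 : Int) ≤ b := by rcases hb with rfl | rfl <;> norm_num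
    simp only [List.foldl_cons]
    rw [pv_step_eq v b hv hb]
    exact ih (fun x hx => h01 x (List.mem_cons_of_mem _ hx)) (2 * v + b) (by linarith)

-- the arithmetic fold is linear in the seed
theorem pv_foldl_lin (l : List Int) : ∀ v : Int,
    l.foldl (fun a b => 2 * a + b) v = v * 2 ^ l.length + pvNval l := by
  induction l with
  | nil => intro v; simp [pvNval]
  | cons b t ih =>
    intro v
    have hb : pvNval (b :: t) = b * 2 ^ t.length + pvNval t := by
      show List.foldl _ (2 * 0 + b) t = _
      rw [show (2 * 0 + b : Int) = b by ring, ih b]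
    simp only [List.foldl_cons, List.length_cons]
    rw [ih (2 * v + b), hb]
    ring

theorem pvNval_append (l₁ l₂ : List Int) :
    pvNval (l₁ ++ l₂) = pvNval l₁ * 2 ^ l₂.length + pvNval l₂ := by
  show (l₁ ++ l₂).foldl _ 0 = _
  rw [List.foldl_append]
  exact pv_foldl_lin l₂ _

theorem pvNval_bound (l : List Int) (h01 : ∀ b ∈ l, b = 0 ∨ b = 1) :
    0 ≤ pvNval l ∧ pvNval l < 2 ^ l.length := by
  induction l with
  | nil => simp [pvNval]
  | cons b t ih =>
    have hb : pvNval (b :: t) = b * 2 ^ t.length + pvNval t := by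
      show List.foldl _ (2 * 0 + b) t = _
      rw [show (2 * 0 + b : Int) = b by ring, pv_foldl_lin t b]
    obtain ⟨ih0, ih1⟩ := ih (fun x hx => h01 x (List.mem_cons_of_mem _ hx))
    have hpow : (0 : Int) < 2 ^ t.length := by positivity
    rcases h01 b List.mem_cons_self with rfl | rfl <;>
      simp only [hb, List.length_cons, pow_succ] <;> constructor <;> nlinarith

theorem pvNval_replicate_zero (k : Nat) : pvNval (List.replicate k (0 : Int)) = 0 := by
  induction k with
  | zero => rfl
  | succ n ih =>
    rw [List.replicate_succ]
    show List.foldl _ (2 * 0 + 0) _ = _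
    rw [show (2 * 0 + 0 : Int) = 0 by ring]
    exact ih

-- masking with 0x1FFFFF is the identity below 2^21
theorem pv_mask_id (x : Int) (h0 : 0 ≤ x) (h : x < 2 ^ 21) :
    PySem.Int.band x 0x1FFFFF = x := by
  obtain ⟨n, rfl⟩ := Int.eq_ofNat_of_zero_le h0
  rw [show (0x1FFFFF : Int) = ((0x1FFFFF : Nat) : Int) by norm_num, PySem.Int.band_natCast,
    show (0x1FFFFF : Nat) = 2 ^ 21 - 1 from rfl, Nat.and_two_pow_sub_one_eq_mod,
    Nat.mod_eq_of_lt (by exact_mod_cast h)]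

-- pvChunkVal of a 0/1 list of length ≤ 21 is its MSB-first value
theorem pvChunkVal_eq (l : List Int) (h01 : ∀ b ∈ l, b = 0 ∨ b = 1) (hlen : l.length ≤ 21) :
    pvChunkVal l = pvNval l := by
  unfold pvChunkVal
  rw [pv_foldl_step_eq l h01 0 le_rfl]
  obtain ⟨h0, h1⟩ := pvNval_bound l h01
  exact pv_mask_id _ h0 (lt_of_lt_of_le h1 (pow_le_pow_right₀ (by norm_num) hlen))

-- B's rev7 is the value of A's bit list
theorem pvRev7_eq_nval (v : Int) : pvRev7 v = pvNval (pvBits7 v) := by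
  simp [pvRev7, pvBits7, pvNval, List.foldl_map]

-- the while-padding in closed form
theorem pvPad21_eq (l : List Int) :
    pvPad21 l = l ++ List.replicate ((21 - l.length % 21) % 21) (0 : Int) := by
  fun_induction pvPad21 l with
  | case1 l h ih =>
    rw [ih, List.append_assoc]
    congr 1
    rw [List.singleton_append, ← List.replicate_succ]
    congr 1
    simp only [List.length_append, List.length_cons, List.length_nil]
    omega
  | case2 l h =>
    have : (21 - l.length % 21) % 21 = 0 := by omega
    simp [this]

-- the index/slice chunk loop is the structural one
theorem pvChunkLoop_eq (bits : List Int) : ∀ i : Nat, i ≤ bits.length →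
    pvChunkLoop bits i = pvChunks21 (bits.drop i) := by
  intro i
  fun_induction pvChunkLoop bits i with
  | case1 i h ih =>
    intro hi
    rw [pvChunks21]
    rw [if_neg (by simp only [List.drop_eq_nil_iff]; omega)]
    rw [show ((i : Int) + 21) = ((i : Int) + ((21 : Nat) : Int)) by norm_num,
      PySem.List.slice_natCast_add]
    congr 1
    rw [List.drop_drop]
    by_cases h21 : i + 21 ≤ bits.length
    · exact ih h21
    · rw [pvChunkLoop, if_neg (by omega), List.drop_eq_nil_of_le (by omega), pvChunks21,
        if_pos rfl]
  | case2 i h =>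
    intro hi
    rw [List.drop_eq_nil_of_le (by omega), pvChunks21, if_pos rfl]

theorem pvChunks21_cons (p t : List Int) (hp : p.length = 21) :
    pvChunks21 (p ++ t) = pvChunkVal p :: pvChunks21 t := by
  have hne : p ++ t ≠ [] := by
    intro h
    have := congrArg List.length h
    simp [hp] at this
  rw [pvChunks21, if_neg hne]
  congr 1
  · congr 1
    rw [← hp, List.take_left]
  · rw [← hp, List.drop_left]

theorem pv_code_eq (m : Nat) : PySem.Int.band ((m : Nat) : Int) 0x7F = ((m &&& 127 : Nat) : Int) := by
  rw [show (0x7F : Int) = ((127 : Nat) : Int) by norm_num, PySem.Int.band_natCast]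

theorem pv_bits01_code (ch : Char) :
    ∀ b ∈ pvBits7 (PySem.Int.band ((ch.toNat : Int)) 0x7F), b = 0 ∨ b = 1 := by
  rw [pv_code_eq]; exact pvBits7_01 _

theorem pv_rep01 (k : Nat) : ∀ b ∈ List.replicate k (0 : Int), b = 0 ∨ b = 1 :=
  fun _ hb => Or.inl (List.eq_of_mem_replicate hb)

theorem pvChunks21_single (l : List Int) (h : l.length = 21) :
    pvChunks21 l = [pvChunkVal l] := by
  have hne : l ≠ [] := by intro he; rw [he] at h; simp at h
  rw [pvChunks21, if_neg hne, List.take_of_length_le (by omega),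
    List.drop_eq_nil_of_le (by omega), pvChunks21, if_pos rfl]

theorem pvPad21_append (p t : List Int) (hp : p.length = 21) :
    pvPad21 (p ++ t) = p ++ pvPad21 t := by
  rw [pvPad21_eq, pvPad21_eq, List.append_assoc]
  congr 3
  simp only [List.length_append, hp]
  omega

-- the main induction, three characters at a time
theorem pv_main (cs : List Char) :
    pvChunks21 (pvPad21 (cs.flatMap (fun ch => pvBits7 (PySem.Int.band ((ch.toNat : Int)) 0x7F)))) =
      pvGroup3 (cs.map (fun ch => pvRev7 (PySem.Int.band ((ch.toNat : Int)) 0x7F))) := by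
  match cs with
  | [] =>
    rw [List.flatMap_nil, List.map_nil, pvPad21_eq]
    simp only [List.length_nil, List.nil_append]
    rw [show (21 - 0 % 21) % 21 = 0 by norm_num, List.replicate_zero, pvChunks21, if_pos rfl]
    rfl
  | [a] =>
    simp only [List.flatMap_cons, List.flatMap_nil, List.append_nil, List.map_cons, List.map_nil]
    rw [pvPad21_eq, pvBits7_length]
    rw [show (21 - 7 % 21) % 21 = 14 by norm_num]
    have h01 : ∀ b ∈ pvBits7 (PySem.Int.band ((a.toNat : Int)) 0x7F) ++ List.replicate 14 (0 : Int),
        b = 0 ∨ b = 1 := by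
      intro b hb
      rcases List.mem_append.mp hb with h | h
      · exact pv_bits01_code a b h
      · exact pv_rep01 14 b h
    rw [pvChunks21_single _ (by simp [pvBits7_length]),
      pvChunkVal_eq _ h01 (by simp [pvBits7_length]),
      pvNval_append, pvNval_replicate_zero, pvRev7_eq_nval, pvGroup3]
    norm_num
    ring
  | [a, b] =>
    simp only [List.flatMap_cons, List.flatMap_nil, List.append_nil, List.map_cons, List.map_nil]
    rw [pvPad21_eq]
    rw [show ((pvBits7 (PySem.Int.band ((a.toNat : Int)) 0x7F) ++
        pvBits7 (PySem.Int.band ((b.toNat : Int)) 0x7F)).length) = 14 by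
      simp [pvBits7_length]]
    rw [show (21 - 14 % 21) % 21 = 7 by norm_num]
    have h01 : ∀ x ∈ (pvBits7 (PySem.Int.band ((a.toNat : Int)) 0x7F) ++
        pvBits7 (PySem.Int.band ((b.toNat : Int)) 0x7F)) ++ List.replicate 7 (0 : Int),
        x = 0 ∨ x = 1 := by
      intro x hx
      rcases List.mem_append.mp hx with h | h
      · rcases List.mem_append.mp h with h' | h'
        · exact pv_bits01_code a x h'
        · exact pv_bits01_code b x h'
      · exact pv_rep01 7 x h
    rw [pvChunks21_single _ (by simp [pvBits7_length]),
      pvChunkVal_eq _ h01 (by simp [pvBits7_length]),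
      pvNval_append, pvNval_append, pvNval_replicate_zero, pvBits7_length,
      List.length_replicate, pvRev7_eq_nval, pvRev7_eq_nval, pvGroup3]
    norm_num
  | a :: b :: c :: rest =>
    simp only [List.flatMap_cons, List.map_cons]
    rw [← List.append_assoc, ← List.append_assoc]
    rw [pvPad21_append _ _ (by simp [pvBits7_length])]
    rw [pvChunks21_cons _ _ (by simp [pvBits7_length])]
    have h01 : ∀ x ∈ (pvBits7 (PySem.Int.band ((a.toNat : Int)) 0x7F) ++
        pvBits7 (PySem.Int.band ((b.toNat : Int)) 0x7F)) ++
        pvBits7 (PySem.Int.band ((c.toNat : Int)) 0x7F), x = 0 ∨ x = 1 := by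
      intro x hx
      rcases List.mem_append.mp hx with h | h
      · rcases List.mem_append.mp h with h' | h'
        · exact pv_bits01_code a x h'
        · exact pv_bits01_code b x h'
      · exact pv_bits01_code c x h
    rw [pvChunkVal_eq _ h01 (by simp [pvBits7_length]),
      pvNval_append, pvNval_append, pvBits7_length, pvBits7_length,
      pvRev7_eq_nval, pvRev7_eq_nval, pvRev7_eq_nval, pvGroup3, pv_main rest]
    norm_num
termination_by cs.length

-- ===== VERDICT (by name: the statement is the Claim_ definition above) =====
theorem encode_alpha_spec : Claim_equal_encode_alpha := by
  intro text _
  unfold Spec_encode_alpha encode_alpha encode_alpha_alt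
  rw [PySem.List.foldl_append_eq_flatMap]
  rw [List.nil_append]
  rw [pvChunkLoop_eq _ 0 (Nat.zero_le _), List.drop_zero, pv_main]
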